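-- pv_equiv track=rewrite | github.com/SSAFY14-class5-Study/python_study | week2/JY/swea_14555.py | find_minimum_ball
-- ===== SOURCE A (Python) =====
-- def find_minimum_ball(str):
--     count = 0
--
--     str = list(str)
--     for i in range(len(str) - 1):
--         if str[i] == '(' and str[i+1] != ')':
--             count += 1
--         elif str[i] != '(' and str[i+1] == ')':
--             count += 1
--         elif str[i] == '(' and str[i+1] ==')':
--             count += 1
--     return count
-- ===== SOURCE B (Python) =====
-- def find_minimum_ball(str):
--     opens = str[:-1].count('(')
--     closes = str[1:].count(')')
--     pairs = sum(1 for a, b in zip(str, str[1:]) if a == '(' and b == ')')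
--     return opens + closes - pairs
-- ===== Notes on version B (the rewrite author's own statement) =====
-- stated objective: faster
-- what changed: Replaces the per-index loop with its three branch tests by inclusion-exclusion over whole-sequence counts: occurrences of the open paren in str[:-1] plus occurrences of the close paren in str[1:] minus the number of adjacent open-close pairs.
import Mathlib
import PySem

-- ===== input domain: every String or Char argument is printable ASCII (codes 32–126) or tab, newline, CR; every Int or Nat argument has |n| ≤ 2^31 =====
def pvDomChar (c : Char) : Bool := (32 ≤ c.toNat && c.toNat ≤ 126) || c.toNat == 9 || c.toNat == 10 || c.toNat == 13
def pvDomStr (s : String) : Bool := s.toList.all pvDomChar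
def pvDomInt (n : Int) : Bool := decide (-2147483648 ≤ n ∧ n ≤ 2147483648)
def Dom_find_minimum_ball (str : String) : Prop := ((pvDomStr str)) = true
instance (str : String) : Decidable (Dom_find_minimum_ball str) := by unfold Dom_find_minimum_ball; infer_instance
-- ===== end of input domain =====

-- B replaces A's index loop (three branch tests at each position) by inclusion–exclusion
-- over whole-sequence counts; same O(n) cost, different decomposition.

-- ===== PORT A =====
def find_minimum_ball (str : String) : Int :=
  let s := str.toList
  (PySem.List.pyRange 0 ((s.length : Int) - 1) 1).foldl
    (fun count i =>
      if PySem.List.pyGetD s i ' ' == '(' && !(PySem.List.pyGetD s (i + 1) ' ' == ')') then count + 1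
      else if !(PySem.List.pyGetD s i ' ' == '(') && PySem.List.pyGetD s (i + 1) ' ' == ')' then count + 1
      else if PySem.List.pyGetD s i ' ' == '(' && PySem.List.pyGetD s (i + 1) ' ' == ')' then count + 1
      else count)
    0

-- ===== PORT B =====
def find_minimum_ball_alt (str : String) : Int :=
  let cs := str.toList
  let opens : Int := (PySem.List.slice cs none (some (-1))).count '('
  let closes : Int := (PySem.List.slice cs (some 1) none).count ')'
  let pairs : Int := (cs.zip (PySem.List.slice cs (some 1) none)).countP
      (fun q => q.1 == '(' && q.2 == ')')
  opens + closes - pairs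

-- ===== PRECONDITION & SPEC =====
def Spec_find_minimum_ball (str : String) (out : Int) : Prop := out = find_minimum_ball_alt str
instance (str : String) (out : Int) : Decidable (Spec_find_minimum_ball str out) := by unfold Spec_find_minimum_ball; infer_instance

-- ===== CLAIM (what is proved, stated in full; the proofs are below) =====
def Claim_equal_find_minimum_ball : Prop := ∀ (str : String), Dom_find_minimum_ball str → Spec_find_minimum_ball str (find_minimum_ball str)

-- ===== LEMMAS AND PROOFS =====

/-- Folding "+1 when the predicate holds" counts the satisfying elements. -/
lemma foldl_if_count {α : Type} (f : α → Bool) :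
    ∀ (l : List α) (n : Int),
      l.foldl (fun c x => if f x then c + 1 else c) n = n + l.countP f
  | [], n => by simp
  | x :: t, n => by
      simp only [List.foldl_cons, List.countP_cons, foldl_if_count f t]
      by_cases h : f x = true <;> simp [h] <;> ring

/-- Counting indices with an adjacent-pair property equals counting over zip with the tail. -/
lemma countP_range_adj (d : Char) (p : Char → Char → Bool) :
    ∀ cs : List Char,
      (List.range (cs.length - 1)).countP (fun k => p (cs.getD k d) (cs.getD (k + 1) d))
        = (cs.zip cs.tail).countP (fun q => p q.1 q.2)
  | [] => by simp
  | [a] => by simp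
  | a :: b :: t => by
      have ih := countP_range_adj d p (b :: t)
      have hlen : (a :: b :: t).length - 1 = ((b :: t).length - 1) + 1 := by simp
      rw [hlen, List.range_succ_eq_map, List.countP_cons, List.countP_map]
      have hf : ((fun k => p ((a :: b :: t).getD k d) ((a :: b :: t).getD (k + 1) d)) ∘ Nat.succ)
          = (fun k => p ((b :: t).getD k d) ((b :: t).getD (k + 1) d)) := by
        funext k; simp [Function.comp]
      rw [hf, ih]
      rw [show (a :: b :: t).zip (a :: b :: t).tail
            = (a, b) :: ((b :: t).zip (b :: t).tail) by simp, List.countP_cons]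
      simp

/-- Inclusion–exclusion on adjacent pairs. -/
lemma incl_excl :
    ∀ cs : List Char,
      ((cs.zip cs.tail).countP (fun q => q.1 == '(' || q.2 == ')') : Int)
        = (cs.dropLast.count '(' : Int) + (cs.tail.count ')' : Int)
          - ((cs.zip cs.tail).countP (fun q => q.1 == '(' && q.2 == ')') : Int)
  | [] => by simp
  | [a] => by simp
  | a :: b :: t => by
      have ih := incl_excl (b :: t)
      rw [show (a :: b :: t).zip (a :: b :: t).tail
            = (a, b) :: ((b :: t).zip (b :: t).tail) by simp]
      simp only [List.countP_cons, List.tail_cons, List.count_cons,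
        List.dropLast_cons₂] at *
      by_cases h1 : (a == '(') = true <;> by_cases h2 : (b == ')') = true <;>
        simp only [h1, h2] at * <;> push_cast at * <;> simp_all <;> omega

-- ===== VERDICT (by name: the statement is the Claim_ definition above) =====
theorem find_minimum_ball_spec : Claim_equal_find_minimum_ball := by
  intro str _
  unfold Spec_find_minimum_ball find_minimum_ball find_minimum_ball_alt
  set cs := str.toList with hcs
  simp only [PySem.List.slice_to_neg_one, PySem.List.slice_from_one]
  -- turn A's three branches into a single disjunctive test
  have hbody : (fun (count : Int) (i : Int) =>
      if PySem.List.pyGetD cs i ' ' == '(' && !(PySem.List.pyGetD cs (i + 1) ' ' == ')') then count + 1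
      else if !(PySem.List.pyGetD cs i ' ' == '(') && PySem.List.pyGetD cs (i + 1) ' ' == ')' then count + 1
      else if PySem.List.pyGetD cs i ' ' == '(' && PySem.List.pyGetD cs (i + 1) ' ' == ')' then count + 1
      else count)
      = (fun (count : Int) (i : Int) =>
          if (PySem.List.pyGetD cs i ' ' == '(' || PySem.List.pyGetD cs (i + 1) ' ' == ')') then count + 1 else count) := by
    funext c i
    cases h1 : (PySem.List.pyGetD cs i ' ' == '(') <;>
      cases h2 : (PySem.List.pyGetD cs (i + 1) ' ' == ')') <;> simp [h1, h2]
  rw [hbody]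
  rw [PySem.List.pyRange_one]
  rw [List.foldl_map]
  have hn : (((cs.length : Int) - 1) - 0).toNat = cs.length - 1 := by omega
  rw [hn]
  have hstep : (fun (c : Int) (k : Nat) =>
      if (PySem.List.pyGetD cs (0 + (k : Int)) ' ' == '(' || PySem.List.pyGetD cs ((0 + (k : Int)) + 1) ' ' == ')') then c + 1 else c)
      = (fun (c : Int) (k : Nat) =>
          if (fun j => (cs.getD j ' ' == '(' || cs.getD (j + 1) ' ' == ')')) k then c + 1 else c) := by
    funext c k
    have h1 : PySem.List.pyGetD cs (0 + (k : Int)) ' ' = cs.getD k ' ' := by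
      rw [zero_add, PySem.List.pyGetD_natCast]
    have h2 : PySem.List.pyGetD cs ((0 + (k : Int)) + 1) ' ' = cs.getD (k + 1) ' ' := by
      rw [zero_add, show ((k : Int) + 1) = ((k + 1 : Nat) : Int) by push_cast; ring,
        PySem.List.pyGetD_natCast]
    rw [h1, h2]
  rw [hstep, foldl_if_count]
  have hpred := countP_range_adj ' ' (fun x y => (x == '(' || y == ')')) cs
  rw [hpred, zero_add, incl_excl]
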